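-- pv_equiv track=rewrite | github.com/miliar/Code_Jam_Webscraper | solutions_python/solutions_year17_round0_nr2/4655.py | solveError
-- ===== SOURCE A (Python) =====
-- def solveError(number, keyOfFirstError, res='', updated=False):
--     if keyOfFirstError > len(number) - 1:
--         return res
--
--     if keyOfFirstError > 0 and updated == False:
--         res = number[:keyOfFirstError]
--
--
--     if int(number[keyOfFirstError]) > 1:
--         if updated == False:
--             res += str((int(number[keyOfFirstError])) - 1)
--         else:
--             res += "9"
--         return solveError(number, keyOfFirstError + 1, res, True)
--     else:
--         if keyOfFirstError == 0:
--             num = [9 for i in range(len(number))]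
--         else:
--             num = list(number)
--             num[keyOfFirstError-1] = str(int(num[keyOfFirstError-1]) -1)
--             num[keyOfFirstError] = str(9)
--             keyOfFirstError -= 1
--
--         return solveError(num, keyOfFirstError + 1, res, True)
--
--     return res
-- ===== SOURCE B (Python) =====
-- def solveError(number, keyOfFirstError, res='', updated=False):
--     # Closed form: once the first digit is adjusted, every remaining position
--     # contributes exactly one '9', so no recursion/loop over positions is needed.
--     L = len(number)
--     k = keyOfFirstError
--     if k > L - 1:
--         return res
--     d = int(number[k])
--     if d <= 1:
--         if k == 0:
--             return res + '9' * (L - 1)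
--         p = res if updated else number[:k]
--         return p + '9' * (L - k)
--     p = res if (updated or k == 0) else number[:k]
--     first = '9' if updated else str(d - 1)
--     return p + first + '9' * (L - 1 - k)
-- ===== Notes on version B (the rewrite author's own statement) =====
-- stated objective: simpler
-- what changed: Replaces the tail recursion (with its string-to-list mutation and digit reprocessing) by a direct closed form: prefix + one adjusted first digit + a run of '9's, computed in a single case split.
-- outside the precondition, e.g. on solveError('25', -1, '', False): A returns '499', B returns '2499'
import Mathlib
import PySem

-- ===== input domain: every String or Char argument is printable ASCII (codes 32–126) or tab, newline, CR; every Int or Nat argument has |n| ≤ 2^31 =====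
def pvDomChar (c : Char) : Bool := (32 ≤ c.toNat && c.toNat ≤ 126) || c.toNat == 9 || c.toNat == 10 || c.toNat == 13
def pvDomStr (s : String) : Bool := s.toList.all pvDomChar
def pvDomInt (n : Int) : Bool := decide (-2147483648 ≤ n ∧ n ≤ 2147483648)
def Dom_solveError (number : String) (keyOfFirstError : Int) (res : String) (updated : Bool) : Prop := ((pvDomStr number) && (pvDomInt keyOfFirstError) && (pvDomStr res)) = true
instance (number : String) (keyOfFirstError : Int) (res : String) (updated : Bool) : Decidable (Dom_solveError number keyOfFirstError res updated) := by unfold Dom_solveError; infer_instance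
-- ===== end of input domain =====

-- B replaces A's tail recursion by a closed-form case split (prefix + one adjusted digit + a run
-- of '9's); equivalence is about return values only (neither version mutates its arguments).

-- ===== PORT A =====
-- A is one Python function that recurses either on the original string or, after the first
-- low digit, on a mutable list; the port splits it into a string-mode and a list-mode helper.
-- The Python list stores decimal strings and re-parses them with int() at each read; the port
-- stores the parsed Int directly (str/int round-trip exactly; the one "-1" entry A can write
-- at position key-1 is never read again).  fuel is a totality guard only; the supplied
-- 2*len+2 is proved sufficient on the admitted inputs.

-- list-mode recursion of A (entered only with updated = true)
def solveErrorList (fuel : Nat) (num : List Int) (key : Int) (res : List Char) (updated : Bool) : List Char :=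
  match fuel with
  | 0 => res  -- fuel guard, unreachable with the fuel supplied by solveError
  | fuel + 1 =>
    if key > PySem.List.len num - 1 then res
    else
      -- Python's `res = number[:key]` line: in list mode it would TypeError, but it is guarded
      -- by `updated == False` and this helper is only ever entered with updated = true.
      match PySem.List.pyGet? num key with
      | none => res  -- IndexError: unreachable under Pre_ (0 ≤ key ≤ len - 1 here)
      | some d =>
        if d > 1 then
          solveErrorList fuel num (key + 1)
            (res ++ (if updated then ['9'] else PySem.Int.toChars (d - 1))) true
        else
          if key = 0 then
            solveErrorList fuel (List.replicate num.length 9) (key + 1) res true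
          else
            let prev := (PySem.List.pyGet? num (key - 1)).getD 0
            let num' := PySem.List.pySetD (PySem.List.pySetD num (key - 1) (prev - 1)) key 9
            solveErrorList fuel num' (key - 1 + 1) res true

-- string-mode recursion of A
def solveErrorStr (fuel : Nat) (cs : List Char) (key : Int) (res : List Char) (updated : Bool) : List Char :=
  match fuel with
  | 0 => res  -- fuel guard, unreachable with the fuel supplied by solveError
  | fuel + 1 =>
    if key > PySem.List.len cs - 1 then res
    else
      let res := if key > 0 && !updated then PySem.List.slice cs none (some key) else res
      match PySem.List.pyGet? cs key with
      | none => res  -- IndexError: excluded by Pre_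
      | some c =>
        match PySem.Int.ofChars? [c] with
        | none => res  -- ValueError from int(): excluded by Pre_
        | some d =>
          if d > 1 then
            solveErrorStr fuel cs (key + 1)
              (res ++ (if updated then ['9'] else PySem.Int.toChars (d - 1))) true
          else
            if key = 0 then
              solveErrorList fuel (List.replicate cs.length 9) (key + 1) res true
            else
              -- num = list(number), then num[key-1] -= 1, num[key] = 9, key -= 1
              let num := cs.map (fun ch => (PySem.Int.ofChars? [ch]).getD 0)
              let prev := (PySem.List.pyGet? num (key - 1)).getD 0
              let num' := PySem.List.pySetD (PySem.List.pySetD num (key - 1) (prev - 1)) key 9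
              solveErrorList fuel num' (key - 1 + 1) res true

def solveError (number : String) (keyOfFirstError : Int) (res : String) (updated : Bool) : String :=
  String.ofList (solveErrorStr (2 * number.toList.length + 2) number.toList keyOfFirstError res.toList updated)

-- ===== PORT B =====
def pvNines (n : Nat) : List Char := List.replicate n '9'

def solveError_alt (number : String) (keyOfFirstError : Int) (res : String) (updated : Bool) : String :=
  let cs := number.toList
  let L : Int := PySem.List.len cs
  if keyOfFirstError > L - 1 then res
  else
    match PySem.List.pyGet? cs keyOfFirstError with
    | none => res  -- IndexError: excluded by Pre_
    | some c =>
      match PySem.Int.ofChars? [c] with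
      | none => res  -- ValueError from int(): excluded by Pre_
      | some d =>
        String.ofList (
          if d ≤ 1 then
            if keyOfFirstError = 0 then res.toList ++ pvNines (cs.length - 1)
            else (if updated then res.toList else PySem.List.slice cs none (some keyOfFirstError))
                 ++ pvNines (L - keyOfFirstError).toNat
          else
            (if updated || keyOfFirstError = 0 then res.toList
             else PySem.List.slice cs none (some keyOfFirstError))
            ++ (if updated then ['9'] else PySem.Int.toChars (d - 1))
            ++ pvNines (L - 1 - keyOfFirstError).toNat)

-- ===== PRECONDITION & SPEC =====
-- Pre_ admits every input with keyOfFirstError past the last index (A returns res at once) and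
-- every all-digit string with 0 ≤ keyOfFirstError.  It excludes (a) inputs where A raises
-- (a non-digit char reached by int(), or an index below -len), and (b) negative keyOfFirstError
-- values that reach the string via Python's negative-index wraparound — a nonsense input for an
-- error position, on which A's returned value is an accident of the wraparound.
def Pre_solveError (number : String) (keyOfFirstError : Int) (res : String) (updated : Bool) : Prop :=
  keyOfFirstError > (number.toList.length : Int) - 1 ∨
  (0 ≤ keyOfFirstError ∧
    number.toList.all (fun c => c ∈ ['0','1','2','3','4','5','6','7','8','9']) = true)
instance (number : String) (keyOfFirstError : Int) (res : String) (updated : Bool) : Decidable (Pre_solveError number keyOfFirstError res updated) := by unfold Pre_solveError; infer_instance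

def pvWitness_solveError : String × Int × String × Bool := ("3102", 0, "", false)

def Spec_solveError (number : String) (keyOfFirstError : Int) (res : String) (updated : Bool) (out : String) : Prop := out = solveError_alt number keyOfFirstError res updated
instance (number : String) (keyOfFirstError : Int) (res : String) (updated : Bool) (out : String) : Decidable (Spec_solveError number keyOfFirstError res updated out) := by unfold Spec_solveError; infer_instance

-- ===== CLAIM (what is proved, stated in full; the proofs are below) =====
def Claim_equal_solveError : Prop := ∀ (number : String) (keyOfFirstError : Int) (res : String) (updated : Bool), Dom_solveError number keyOfFirstError res updated → Pre_solveError number keyOfFirstError res updated → Spec_solveError number keyOfFirstError res updated (solveError number keyOfFirstError res updated)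

-- ===== LEMMAS AND PROOFS =====

lemma pv_digit_parse {c : Char} (h : c ∈ ['0','1','2','3','4','5','6','7','8','9']) :
    ∃ d : Int, PySem.Int.ofChars? [c] = some d ∧ 0 ≤ d ∧ d ≤ 9 := by
  fin_cases h
  · exact ⟨0, by decide, by decide, by decide⟩
  · exact ⟨1, by decide, by decide, by decide⟩
  · exact ⟨2, by decide, by decide, by decide⟩
  · exact ⟨3, by decide, by decide, by decide⟩
  · exact ⟨4, by decide, by decide, by decide⟩
  · exact ⟨5, by decide, by decide, by decide⟩
  · exact ⟨6, by decide, by decide, by decide⟩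
  · exact ⟨7, by decide, by decide, by decide⟩
  · exact ⟨8, by decide, by decide, by decide⟩
  · exact ⟨9, by decide, by decide, by decide⟩

lemma pv_nines_shift (res : List Char) (m : Nat) :
    (res ++ ['9']) ++ List.replicate m '9' = res ++ List.replicate (m + 1) '9' := by
  simp [List.replicate_succ]

-- invariant of A's list-mode loop with updated = true: every remaining position emits one '9'
lemma solveErrorList_nines :
    ∀ (fuel : Nat) (num : List Int) (key : Int) (res : List Char),
      0 < key → key ≤ (num.length : Int) →
      (∀ (j : Nat) (hj : j < num.length), key ≤ (j : Int) → 0 ≤ num[j] ∧ num[j] ≤ 9) →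
      2 * (num.length - key.toNat) + 1 ≤ fuel →
      solveErrorList fuel num key res true = res ++ List.replicate (num.length - key.toNat) '9' := by
  intro fuel
  induction fuel using Nat.strong_induction_on with
  | _ fuel ih =>
    intro num key res h1 h2 hent hfuel
    obtain ⟨f, rfl⟩ : ∃ f, fuel = f + 1 := ⟨fuel - 1, by omega⟩
    rw [solveErrorList]
    by_cases hk : key > PySem.List.len num - 1
    · rw [if_pos hk]
      rw [PySem.List.len_eq] at hk
      have : num.length - key.toNat = 0 := by omega
      simp [this]
    · rw [if_neg hk]
      rw [PySem.List.len_eq] at hk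
      have hklt : key < (num.length : Int) := by omega
      have hkey : key.toNat < num.length := by omega
      have hg := PySem.List.pyGet?_eq_some_getElem num (i := key) (by omega) hklt
      simp only [hg]
      obtain ⟨hd0, hd9⟩ := hent key.toNat hkey (by omega)
      have hm : num.length - key.toNat = (num.length - (key + 1).toNat) + 1 := by omega
      by_cases hd : num[key.toNat]'hkey > 1
      · rw [if_pos hd]
        rw [ih f (by omega) num (key + 1) _ (by omega) (by omega)
          (fun j hj hjk => hent j hj (by omega)) (by omega)]
        rw [hm, ← pv_nines_shift]
        simp
      · rw [if_neg hd, if_neg (by omega : ¬ key = 0)]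
        obtain ⟨f', rfl⟩ : ∃ f', f = f' + 1 := ⟨f - 1, by omega⟩
        have hset : PySem.List.pySetD (PySem.List.pySetD num (key - 1)
            ((PySem.List.pyGet? num (key - 1)).getD 0 - 1)) key 9
            = (num.set (key - 1).toNat ((PySem.List.pyGet? num (key - 1)).getD 0 - 1)).set key.toNat 9 := by
          rw [PySem.List.pySetD_of_nonneg _ _ (by omega : (0:Int) ≤ key - 1),
            PySem.List.pySetD_of_nonneg _ _ (by omega : (0:Int) ≤ key)]
        rw [hset]
        set num' := (num.set (key - 1).toNat ((PySem.List.pyGet? num (key - 1)).getD 0 - 1)).set key.toNat 9 with hnum'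
        have hlen' : num'.length = num.length := by simp [hnum']
        have hkey' : key.toNat < num'.length := by omega
        have hentry' : ∀ (j : Nat) (hj : j < num'.length), key + 1 ≤ (j : Int) → 0 ≤ num'[j] ∧ num'[j] ≤ 9 := by
          intro j hj hjk
          have hj2 : j < num.length := by omega
          have e1 : num'[j]'hj = num[j]'hj2 := by
            simp only [hnum', List.getElem_set]
            rw [if_neg (by omega), if_neg (by omega)]
          rw [e1]
          exact hent j hj2 (by omega)
        rw [show key - 1 + 1 = key from by ring]
        rw [solveErrorList]
        rw [if_neg (by rw [PySem.List.len_eq, hlen']; omega)]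
        have hg' := PySem.List.pyGet?_eq_some_getElem num' (i := key) (by omega) (by rw [hlen']; exact hklt)
        simp only [hg']
        have h9 : num'[key.toNat]'hkey' = 9 := by
          simp [hnum']
        rw [if_pos (by rw [h9]; norm_num)]
        rw [ih f' (by omega) num' (key + 1) _ (by omega) (by rw [hlen']; omega)
          hentry' (by rw [hlen']; omega)]
        rw [show num'.length - (key + 1).toNat = num.length - (key + 1).toNat from by omega]
        rw [hm, ← pv_nines_shift]
        simp

-- one step from a position already rewritten to 9
lemma solveErrorList_step9 :
    ∀ (fuel : Nat) (num : List Int) (key : Int) (res : List Char),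
      ∀ (h1 : 0 < key) (h2 : key < (num.length : Int)),
      (∀ (j : Nat) (hj : j < num.length), key ≤ (j : Int) → 0 ≤ num[j] ∧ num[j] ≤ 9) →
      num[key.toNat]'(by omega) = 9 →
      2 * (num.length - key.toNat) ≤ fuel →
      solveErrorList fuel num key res true = res ++ List.replicate (num.length - key.toNat) '9' := by
  intro fuel num key res h1 h2 hent h9 hfuel
  obtain ⟨f, rfl⟩ : ∃ f, fuel = f + 1 := ⟨fuel - 1, by omega⟩
  rw [solveErrorList]
  rw [if_neg (by rw [PySem.List.len_eq]; omega)]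
  have hg := PySem.List.pyGet?_eq_some_getElem num (i := key) (by omega) h2
  simp only [hg]
  rw [if_pos (by rw [h9]; norm_num)]
  rw [solveErrorList_nines f num (key + 1) _ (by omega) (by omega)
    (fun j hj hjk => hent j hj (by omega)) (by omega)]
  rw [show num.length - key.toNat = (num.length - (key + 1).toNat) + 1 from by omega,
    ← pv_nines_shift]
  simp

-- invariant of A's string-mode loop with updated = true
lemma solveErrorStr_nines :
    ∀ (fuel : Nat) (cs : List Char) (key : Int) (res : List Char),
      0 < key → key ≤ (cs.length : Int) →
      cs.all (fun c => c ∈ ['0','1','2','3','4','5','6','7','8','9']) = true →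
      2 * (cs.length - key.toNat) + 1 ≤ fuel →
      solveErrorStr fuel cs key res true = res ++ List.replicate (cs.length - key.toNat) '9' := by
  intro fuel
  induction fuel with
  | zero => intro cs key res h1 h2 hall hfuel; omega
  | succ f ih =>
    intro cs key res h1 h2 hall hfuel
    rw [solveErrorStr]
    by_cases hk : key > PySem.List.len cs - 1
    · rw [if_pos hk]
      rw [PySem.List.len_eq] at hk
      have : cs.length - key.toNat = 0 := by omega
      simp [this]
    · rw [if_neg hk]
      rw [PySem.List.len_eq] at hk
      have hklt : key < (cs.length : Int) := by omega
      have hkey : key.toNat < cs.length := by omega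
      have hg := PySem.List.pyGet?_eq_some_getElem cs (i := key) (by omega) hklt
      simp only [hg, Bool.not_true, Bool.and_false, Bool.false_eq_true, if_false]
      obtain ⟨d, hp, hd0, hd9⟩ :=
        pv_digit_parse (by simpa using List.all_eq_true.mp hall _ (List.getElem_mem hkey))
      simp only [hp]
      have hm : cs.length - key.toNat = (cs.length - (key + 1).toNat) + 1 := by omega
      by_cases hd : d > 1
      · rw [if_pos hd]
        rw [ih cs (key + 1) _ (by omega) (by omega) hall (by omega)]
        rw [hm, ← pv_nines_shift]
        simp
      · rw [if_neg hd, if_neg (by omega : ¬ key = 0)]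
        have hset : ∀ v : Int, PySem.List.pySetD
            (PySem.List.pySetD (cs.map fun ch => (PySem.Int.ofChars? [ch]).getD 0) (key - 1) v) key 9
            = ((cs.map fun ch => (PySem.Int.ofChars? [ch]).getD 0).set (key - 1).toNat v).set key.toNat 9 := by
          intro v
          rw [PySem.List.pySetD_of_nonneg _ _ (by omega : (0:Int) ≤ key - 1),
            PySem.List.pySetD_of_nonneg _ _ (by omega : (0:Int) ≤ key)]
        rw [hset]
        set v0 := (PySem.List.pyGet? (cs.map fun ch => (PySem.Int.ofChars? [ch]).getD 0) (key - 1)).getD 0 - 1 with hv0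
        set num' := ((cs.map fun ch => (PySem.Int.ofChars? [ch]).getD 0).set (key - 1).toNat v0).set key.toNat 9 with hnum'
        have hlen' : num'.length = cs.length := by simp [hnum']
        have hentry' : ∀ (j : Nat) (hj : j < num'.length), key ≤ (j : Int) → 0 ≤ num'[j] ∧ num'[j] ≤ 9 := by
          intro j hj hjk
          have hj2 : j < cs.length := by omega
          by_cases hje : j = key.toNat
          · subst hje
            simp [hnum']
          · have e1 : num'[j]'hj = (PySem.Int.ofChars? [cs[j]'hj2]).getD 0 := by
              simp only [hnum', List.getElem_set]
              rw [if_neg (by omega), if_neg (by omega)]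
              simp
            obtain ⟨dj, hpj, hj0, hj9⟩ :=
              pv_digit_parse (by simpa using List.all_eq_true.mp hall _ (List.getElem_mem hj2))
            rw [e1, hpj]
            exact ⟨hj0, hj9⟩
        rw [show key - 1 + 1 = key from by ring]
        rw [solveErrorList_step9 f num' key res (by omega) (by rw [hlen']; exact hklt)
          hentry' (by simp [hnum']) (by rw [hlen']; omega)]
        rw [show num'.length - key.toNat = cs.length - key.toNat from by omega]

-- ===== VERDICT (by name: the statement is the Claim_ definition above) =====
theorem solveError_spec : Claim_equal_solveError := by
  intro number key res upd hdom hpre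
  unfold Spec_solveError solveError solveError_alt
  rw [show 2 * number.toList.length + 2 = (2 * number.toList.length + 1) + 1 from by omega]
  rw [solveErrorStr]
  simp only [PySem.List.len_eq]
  by_cases hk : key > (number.toList.length : Int) - 1
  · rw [if_pos hk, if_pos hk]
    simp
  · rcases hpre with h | ⟨h0, hall⟩
    · exact absurd h hk
    rw [if_neg hk, if_neg hk]
    have hklt : key < (number.toList.length : Int) := by omega
    have hkey : key.toNat < number.toList.length := by omega
    have hL1 : 1 ≤ number.toList.length := by omega
    have hg := PySem.List.pyGet?_eq_some_getElem number.toList (i := key) (by omega) hklt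
    simp only [hg]
    obtain ⟨d, hp, hd0, hd9⟩ :=
      pv_digit_parse (by simpa using List.all_eq_true.mp hall _ (List.getElem_mem hkey))
    simp only [hp]
    by_cases hd : d > 1
    · rw [if_pos hd, if_neg (by omega : ¬ d ≤ 1)]
      rw [solveErrorStr_nines _ _ _ _ (by omega) (by omega) hall (by omega)]
      rw [show number.toList.length - (key + 1).toNat
          = ((number.toList.length : Int) - 1 - key).toNat from by omega]
      by_cases hu : upd
      · simp [hu, pvNines, List.append_assoc]
      · by_cases hz : key = 0
        · simp [hu, hz, pvNines, List.append_assoc]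
        · have hpos : key > 0 := by omega
          simp [hu, hz, hpos, pvNines, List.append_assoc]
    · rw [if_neg hd, if_pos (by omega : d ≤ 1)]
      by_cases hz : key = 0
      · rw [if_pos hz, if_pos hz]
        subst hz
        rw [solveErrorList_nines _ _ _ _ (by omega) (by simp only [List.length_replicate]; omega)
          (by intro j hj hjk; simp) (by simp only [List.length_replicate]; omega)]
        rw [show (List.replicate number.toList.length (9:Int)).length - ((0:Int) + 1).toNat
          = number.toList.length - 1 from by simp]
        simp [pvNines]
      · rw [if_neg hz, if_neg hz]
        have hset : PySem.List.pySetD (PySem.List.pySetD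
            (number.toList.map fun ch => (PySem.Int.ofChars? [ch]).getD 0) (key - 1)
            ((PySem.List.pyGet? (number.toList.map fun ch => (PySem.Int.ofChars? [ch]).getD 0) (key - 1)).getD 0 - 1)) key 9
            = (((number.toList.map fun ch => (PySem.Int.ofChars? [ch]).getD 0)).set (key - 1).toNat
               ((PySem.List.pyGet? (number.toList.map fun ch => (PySem.Int.ofChars? [ch]).getD 0) (key - 1)).getD 0 - 1)).set key.toNat 9 := by
          rw [PySem.List.pySetD_of_nonneg _ _ (by omega : (0:Int) ≤ key - 1),
            PySem.List.pySetD_of_nonneg _ _ (by omega : (0:Int) ≤ key)]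
        rw [hset]
        set num' := (((number.toList.map fun ch => (PySem.Int.ofChars? [ch]).getD 0)).set (key - 1).toNat
            ((PySem.List.pyGet? (number.toList.map fun ch => (PySem.Int.ofChars? [ch]).getD 0) (key - 1)).getD 0 - 1)).set key.toNat 9 with hnum'
        have hlen' : num'.length = number.toList.length := by simp [hnum']
        have hentry' : ∀ (j : Nat) (hj : j < num'.length), key ≤ (j : Int) → 0 ≤ num'[j] ∧ num'[j] ≤ 9 := by
          intro j hj hjk
          have hj2 : j < number.toList.length := by omega
          by_cases hje : j = key.toNat
          · subst hje
            simp [hnum']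
          · have e1 : num'[j]'hj = (PySem.Int.ofChars? [number.toList[j]'hj2]).getD 0 := by
              simp only [hnum', List.getElem_set]
              rw [if_neg (by omega), if_neg (by omega)]
              simp
            obtain ⟨dj, hpj, hj0, hj9⟩ :=
              pv_digit_parse (by simpa using List.all_eq_true.mp hall _ (List.getElem_mem hj2))
            rw [e1, hpj]
            exact ⟨hj0, hj9⟩
        rw [show key - 1 + 1 = key from by ring]
        rw [solveErrorList_step9 _ num' key _ (by omega) (by rw [hlen']; exact hklt)
          hentry' (by simp [hnum']) (by rw [hlen']; omega)]
        rw [show num'.length - key.toNat = ((number.toList.length : Int) - key).toNat from by omega]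
        have hpos : key > 0 := by omega
        by_cases hu : upd
        · simp [hu, pvNines]
        · simp [hu, hpos, pvNines]
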